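-- pv_equiv track=rewrite | github.com/89P13-002/itrn | enhanced_faiss_index (1).py | _calculate_query_weights
-- ===== SOURCE A (Python) =====
-- from typing import List, Dict, Tuple, Optional, Set
--
-- def _calculate_query_weights(queries: List[str]) -> List[int]:
--     """Calculate weights for queries: 5, 4, 3, 1, 1, ..."""
--     weights = []
--     for i, _ in enumerate(queries):
--         if i == 0:
--             weights.append(5)
--         elif i == 1:
--             weights.append(4)
--         elif i == 2:
--             weights.append(3)
--         else:
--             weights.append(1)
--     return weights
-- ===== SOURCE B (Python) =====
-- def _calculate_query_weights(queries):
--     n = len(queries)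
--     return [5, 4, 3][:n] + [1] * (n - 3)
-- ===== Notes on version B (the rewrite author's own statement) =====
-- stated objective: simpler
-- what changed: Replaces the enumerate loop with an if/elif cascade by a closed-form list construction: the fixed head [5,4,3] truncated to len(queries) concatenated with the needed number of 1s, built in bulk without per-element branching.
import Mathlib
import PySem

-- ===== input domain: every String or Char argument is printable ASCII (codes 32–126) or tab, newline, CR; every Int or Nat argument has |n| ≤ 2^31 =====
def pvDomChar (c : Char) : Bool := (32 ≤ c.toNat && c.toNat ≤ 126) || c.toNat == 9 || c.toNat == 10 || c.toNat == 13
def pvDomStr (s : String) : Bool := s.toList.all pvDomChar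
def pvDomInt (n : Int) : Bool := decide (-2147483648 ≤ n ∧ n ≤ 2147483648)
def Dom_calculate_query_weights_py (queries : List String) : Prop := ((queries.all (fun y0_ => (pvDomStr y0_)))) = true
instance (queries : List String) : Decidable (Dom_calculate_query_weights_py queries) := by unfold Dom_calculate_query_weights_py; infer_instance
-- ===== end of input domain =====

-- B replaces the enumerate loop with an if/elif cascade by a closed-form list: fixed head [5,4,3] truncated to len(queries) plus the needed 1s (objective: simpler).
-- ===== PORT A =====
-- for i, _ in enumerate(queries): append 5/4/3/1 by the if/elif cascade
def calculate_query_weights_py (queries : List String) : List Int :=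
  (PySem.List.enumerate queries).foldl
    (fun weights p =>
      if p.1 = 0 then weights ++ [5]
      else if p.1 = 1 then weights ++ [4]
      else if p.1 = 2 then weights ++ [3]
      else weights ++ [1]) []

-- ===== PORT B =====
-- [5,4,3][:n] + [1]*(n-3); Nat subtraction is exact here: Python's [1]*k is empty for k ≤ 0
def calculate_query_weights_py_alt (queries : List String) : List Int :=
  ([5, 4, 3] : List Int).take queries.length ++ List.replicate (queries.length - 3) 1

-- ===== PRECONDITION & SPEC =====
def Spec_calculate_query_weights_py (queries : List String) (out : List Int) : Prop := out = calculate_query_weights_py_alt queries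
instance (queries : List String) (out : List Int) : Decidable (Spec_calculate_query_weights_py queries out) := by unfold Spec_calculate_query_weights_py; infer_instance

-- ===== CLAIM (what is proved, stated in full; the proofs are below) =====
def Claim_equal_calculate_query_weights_py : Prop := ∀ (queries : List String), Dom_calculate_query_weights_py queries → Spec_calculate_query_weights_py queries (calculate_query_weights_py queries)

-- ===== LEMMAS AND PROOFS =====

-- ===== VERDICT (by name: the statement is the Claim_ definition above) =====
-- the loop step of A's port
def pvStep (weights : List Int) (p : Int × String) : List Int :=
  if p.1 = 0 then weights ++ [5]
  else if p.1 = 1 then weights ++ [4]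
  else if p.1 = 2 then weights ++ [3]
  else weights ++ [1]

theorem pvFold_acc (xs : List String) (s : Int) (acc : List Int) :
    (PySem.List.enumerate xs s).foldl pvStep acc
      = acc ++ (PySem.List.enumerate xs s).foldl pvStep [] := by
  induction xs generalizing s acc with
  | nil => simp [PySem.List.enumerate_nil]
  | cons x xs ih =>
    rw [PySem.List.enumerate_cons, List.foldl_cons, List.foldl_cons,
        ih (s+1) (pvStep acc (s, x)), ih (s+1) (pvStep [] (s, x))]
    simp [pvStep]; split_ifs <;> simp

theorem pvFold_ones (xs : List String) (s : Int) (hs : 3 ≤ s) :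
    (PySem.List.enumerate xs s).foldl pvStep [] = List.replicate xs.length 1 := by
  induction xs generalizing s with
  | nil => simp [PySem.List.enumerate_nil]
  | cons x xs ih =>
    rw [PySem.List.enumerate_cons, List.foldl_cons, pvFold_acc]
    have h0 : s ≠ 0 := by omega
    have h1 : s ≠ 1 := by omega
    have h2 : s ≠ 2 := by omega
    simp [pvStep, h0, h1, h2, ih (s+1) (by omega), List.replicate_succ]

theorem calculate_query_weights_py_spec : Claim_equal_calculate_query_weights_py := by
  intro queries _
  unfold Spec_calculate_query_weights_py calculate_query_weights_py calculate_query_weights_py_alt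
  show (PySem.List.enumerate queries 0).foldl pvStep [] = _
  match queries with
  | [] => simp [PySem.List.enumerate_nil]
  | [a] =>
    simp [PySem.List.enumerate_cons, PySem.List.enumerate_nil, pvStep]
  | [a, b] =>
    simp [PySem.List.enumerate_cons, PySem.List.enumerate_nil, pvStep]
  | [a, b, c] =>
    simp [PySem.List.enumerate_cons, PySem.List.enumerate_nil, pvStep]
  | a :: b :: c :: rest =>
    rw [PySem.List.enumerate_cons, List.foldl_cons, pvFold_acc,
        PySem.List.enumerate_cons, List.foldl_cons, pvFold_acc,
        PySem.List.enumerate_cons, List.foldl_cons, pvFold_acc]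
    have : (0:Int) + 1 + 1 + 1 = 3 := by norm_num
    rw [this, pvFold_ones rest 3 (by norm_num)]
    norm_num [pvStep]
    omega
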